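-- pv_equiv track=rewrite | github.com/Indian1999/Advent-of-Code | day 3/main.py | handle_dos_and_donts_3
-- ===== SOURCE A (Python) =====
-- def handle_dos_and_donts_3(instruction:str)->str:
--     ins_split = instruction.split("don't")
--     handled_instruction = ""
--     handled_instruction += ins_split[0]
--     for i in range(1, len(ins_split)):
--         if "do()" in ins_split[i]:
--             do_index = ins_split[i].find("do()")
--             handled_instruction += ins_split[i][do_index+4:]
--     return handled_instruction
-- ===== SOURCE B (Python) =====
-- def handle_dos_and_donts_3(instruction: str) -> str:
--     # Single asymmetric scan: while enabled, copy text up to the next "don't";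
--     # while disabled, only look for "do()".  No split list is built.
--     out = []
--     s = instruction
--     enabled = True
--     while True:
--         if enabled:
--             j = s.find("don't")
--             if j == -1:
--                 out.append(s)
--                 break
--             out.append(s[:j])
--             s = s[j + 5:]
--             enabled = False
--         else:
--             j = s.find("do()")
--             if j == -1:
--                 break
--             s = s[j + 4:]
--             enabled = True
--     return "".join(out)
-- ===== Notes on version B (the rewrite author's own statement) =====
-- stated objective: alternative
-- what changed: Replaces split-on-"don't" plus a per-piece find/reassemble loop by a single state-machine scan that alternates between searching for "don't" (enabled, copying) and "do()" (disabled, skipping), building no split list.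
import Mathlib
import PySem

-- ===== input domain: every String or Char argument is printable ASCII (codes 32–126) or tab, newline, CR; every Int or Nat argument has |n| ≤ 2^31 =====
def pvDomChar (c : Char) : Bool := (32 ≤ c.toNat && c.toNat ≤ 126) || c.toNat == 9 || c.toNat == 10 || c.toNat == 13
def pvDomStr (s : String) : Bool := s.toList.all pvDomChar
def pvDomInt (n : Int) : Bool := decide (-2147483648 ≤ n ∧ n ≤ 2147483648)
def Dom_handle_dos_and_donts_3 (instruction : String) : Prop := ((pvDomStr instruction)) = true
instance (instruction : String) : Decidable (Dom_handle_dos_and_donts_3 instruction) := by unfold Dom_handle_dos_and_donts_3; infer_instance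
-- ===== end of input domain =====

-- B replaces A's split-on-"don't" + per-piece reassembly by a single asymmetric
-- enabled/disabled scan (alternative decomposition, same asymptotic cost).


-- ===== PORT A =====
-- literal transliteration of A on the code-point list (split, first piece, then
-- the range(1, len) loop appending the tail of each later piece after its first "do()")
def pvProcA (s : List Char) : List Char :=
  let ins_split := PySem.Chars.splitOn s "don't".toList
  let handled_instruction : List Char := []
  let handled_instruction := handled_instruction ++ PySem.List.pyGetD ins_split 0 []
  (PySem.List.pyRange 1 (PySem.List.len ins_split)).foldl
    (fun acc i =>
      let piece := PySem.List.pyGetD ins_split i []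
      if PySem.Chars.isIn "do()".toList piece then
        let do_index := PySem.Chars.find piece "do()".toList
        acc ++ PySem.List.slice piece (some (do_index + 4)) none
      else acc) handled_instruction

def handle_dos_and_donts_3 (instruction : String) : String :=
  String.ofList (pvProcA instruction.toList)

-- ===== PORT B =====
-- literal transliteration of B's while-loop: state `enabled`, accumulator `out`;
-- enabled → find "don't" (copy up to it), disabled → find "do()" (skip to after it)
def pvScan (enabled : Bool) (s : List Char) (out : List (List Char)) : List (List Char) :=
  if enabled then
    let j := PySem.Chars.find s "don't".toList
    if _h : j = -1 then out ++ [s]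
    else pvScan false (s.drop (j.toNat + 5)) (out ++ [s.take j.toNat])
  else
    let j := PySem.Chars.find s "do()".toList
    if _h : j = -1 then out
    else pvScan true (s.drop (j.toNat + 4)) out
termination_by s.length
decreasing_by
  · have h0 : 0 ≤ PySem.Chars.find s "don't".toList := by
      have := PySem.Chars.neg_one_le_find s "don't".toList
      omega
    have hlen := ((PySem.Chars.find_spec h0).1).length_le
    have h5 : ("don't".toList).length = 5 := by decide
    rw [h5] at hlen
    simp only [List.length_drop] at hlen ⊢
    omega
  · have h0 : 0 ≤ PySem.Chars.find s "do()".toList := by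
      have := PySem.Chars.neg_one_le_find s "do()".toList
      omega
    have hlen := ((PySem.Chars.find_spec h0).1).length_le
    have h5 : ("do()".toList).length = 4 := by decide
    rw [h5] at hlen
    simp only [List.length_drop] at hlen ⊢
    omega

def handle_dos_and_donts_3_alt (instruction : String) : String :=
  String.ofList (pvScan true instruction.toList []).flatten

-- ===== PRECONDITION & SPEC =====
def Spec_handle_dos_and_donts_3 (instruction : String) (out : String) : Prop := out = handle_dos_and_donts_3_alt instruction
instance (instruction : String) (out : String) : Decidable (Spec_handle_dos_and_donts_3 instruction out) := by unfold Spec_handle_dos_and_donts_3; infer_instance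

-- ===== CLAIM (what is proved, stated in full; the proofs are below) =====
def Claim_equal_handle_dos_and_donts_3 : Prop := ∀ (instruction : String), Dom_handle_dos_and_donts_3 instruction → Spec_handle_dos_and_donts_3 instruction (handle_dos_and_donts_3 instruction)

-- ===== LEMMAS AND PROOFS =====

def pvDn : List Char := "don't".toList
def pvDd : List Char := "do()".toList

def pvSplitF (l : List Char) : List (List Char) :=
  if h : pvDn <+: l then [] :: pvSplitF (l.drop 5)
  else match l with

    | [] => [[]]
    | c :: rest => (pvSplitF rest).modifyHead (c :: ·)
termination_by l.length
decreasing_by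
  · have h5 := h.length_le
    have : pvDn.length = 5 := by decide
    simp only [List.length_drop]
    omega
  · simp

theorem pv_modifyHead_fun_id {α : Type} (L : List (List α)) :
    L.modifyHead (fun x => x) = L := by cases L <;> simp

theorem pv_go_spec : ∀ (fuel : Nat) (l cur : List Char) (acc : List (List Char)),
    l.length < fuel →
    PySem.Chars.splitOn.go pvDn fuel l cur acc
      = acc.reverse ++ (pvSplitF l).modifyHead (cur.reverse ++ ·) := by
  intro fuel
  induction fuel with
  | zero => intro l cur acc h; omega
  | succ n ih =>
    intro l cur acc h
    match l with
    | [] =>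
      have hne : ¬ (pvDn <+: ([] : List Char)) := by decide
      rw [PySem.Chars.splitOn.go, pvSplitF]
      · simp [hne]
      · omega
    | c :: rest =>
      rw [PySem.Chars.splitOn.go]
      by_cases hp : pvDn.isPrefixOf (c :: rest)
      · rw [if_pos hp]
        have hpre : pvDn <+: (c :: rest) := List.isPrefixOf_iff_prefix.mp hp
        have hlen : pvDn.length = 5 := by decide
        rw [ih _ _ _ (by simp only [List.length_drop, List.length_cons] at h ⊢; omega)]
        conv_rhs => rw [pvSplitF]
        simp [hpre, hlen, pv_modifyHead_fun_id]
      · rw [if_neg hp]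
        have hpre : ¬ (pvDn <+: (c :: rest)) := fun hc => hp (List.isPrefixOf_iff_prefix.mpr hc)
        rw [ih _ _ _ (by simp at h ⊢; omega)]
        conv_rhs => rw [pvSplitF]
        simp only [hpre, dif_neg, not_false_iff]
        rw [List.modifyHead_modifyHead]
        congr 1
        congr 1
        funext x
        simp

theorem pv_splitOn_eq (l : List Char) : PySem.Chars.splitOn l pvDn = pvSplitF l := by
  rw [PySem.Chars.splitOn, pv_go_spec (l.length + 1) l [] [] (by omega)]
  simp [pv_modifyHead_fun_id]

theorem pv_find_eq (l sub : List Char) (k : Nat) (h1 : sub <+: l.drop k)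
    (h2 : ∀ i < k, ¬ sub <+: l.drop i) : PySem.Chars.find l sub = (k : Int) := by
  have hin : PySem.Chars.isIn sub l = true :=
    (PySem.Chars.exists_prefix_drop_iff_isIn sub l).mp ⟨k, h1⟩
  have h0 : 0 ≤ PySem.Chars.find l sub :=
    (PySem.Chars.find_nonneg_iff l sub).mpr ((PySem.Chars.isIn_iff_infix sub l).mp hin)
  obtain ⟨hpre, hmin⟩ := PySem.Chars.find_spec h0
  rcases lt_trichotomy ((PySem.Chars.find l sub).toNat) k with hlt | heq | hgt
  · exact absurd hpre (h2 _ hlt)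
  · omega
  · exact absurd h1 (hmin k hgt)

theorem pv_splitF_neg : ∀ (n : Nat) (l : List Char), l.length ≤ n →
    PySem.Chars.find l pvDn = -1 → pvSplitF l = [l] := by
  intro n
  induction n with
  | zero =>
    intro l hl _
    have : l = [] := List.eq_nil_of_length_eq_zero (by omega)
    subst this
    rw [pvSplitF, dif_neg (by decide)]
  | succ n ih =>
    intro l hl h
    have hni : ¬ pvDn <:+: l := (PySem.Chars.find_eq_neg_one_iff l pvDn).mp h
    have hnp : ¬ pvDn <+: l := fun hp => hni hp.isInfix
    match l with
    | [] => rw [pvSplitF, dif_neg hnp]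
    | c :: rest =>
      have hr : PySem.Chars.find rest pvDn = -1 := by
        rw [PySem.Chars.find_eq_neg_one_iff]
        exact fun hc => hni (List.infix_cons hc)
      rw [pvSplitF, dif_neg hnp]
      show (pvSplitF rest).modifyHead (c :: ·) = [c :: rest]
      rw [ih rest (by simp at hl; omega) hr]
      rfl

theorem pv_splitF_pos : ∀ (n : Nat) (l : List Char), l.length ≤ n →
    0 ≤ PySem.Chars.find l pvDn →
    pvSplitF l = l.take (PySem.Chars.find l pvDn).toNat
      :: pvSplitF (l.drop ((PySem.Chars.find l pvDn).toNat + 5)) := by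
  intro n
  induction n with
  | zero =>
    intro l hl h0
    have : l = [] := List.eq_nil_of_length_eq_zero (by omega)
    subst this
    have : PySem.Chars.find ([] : List Char) pvDn = -1 := by decide
    omega
  | succ n ih =>
    intro l hl h0
    obtain ⟨hpre, hmin⟩ := PySem.Chars.find_spec h0
    by_cases hj : (PySem.Chars.find l pvDn).toNat = 0
    · have hp : pvDn <+: l := by
        have := hpre
        rw [hj] at this
        simpa using this
      rw [pvSplitF, dif_pos hp, hj]
      simp
    · have hnp : ¬ pvDn <+: l := by
        have := hmin 0 (by omega)
        simpa using this
      match l with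
      | [] =>
        have : PySem.Chars.find ([] : List Char) pvDn = -1 := by decide
        omega
      | c :: rest =>
        obtain ⟨m, hm⟩ : ∃ m, (PySem.Chars.find (c :: rest) pvDn).toNat = m + 1 :=
          ⟨(PySem.Chars.find (c :: rest) pvDn).toNat - 1, by omega⟩
        have hfr : PySem.Chars.find rest pvDn = (m : Int) := by
          apply pv_find_eq
          · rw [← List.drop_succ_cons (a := c), ← hm]
            exact hpre
          · intro i hi hc
            exact hmin (i + 1) (by omega) (by rwa [List.drop_succ_cons])
        have h0r : 0 ≤ PySem.Chars.find rest pvDn := by rw [hfr]; omega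
        rw [pvSplitF, dif_neg hnp]
        show (pvSplitF rest).modifyHead (c :: ·)
            = List.take (PySem.Chars.find (c :: rest) pvDn).toNat (c :: rest)
              :: pvSplitF (List.drop ((PySem.Chars.find (c :: rest) pvDn).toNat + 5) (c :: rest))
        rw [ih rest (by simp at hl; omega) h0r, hfr]
        simp only [Int.toNat_natCast, List.modifyHead_cons]
        rw [hm]
        have e1 : List.take (m + 1) (c :: rest) = c :: List.take m rest := List.take_succ_cons
        have e2 : List.drop (m + 1 + 5) (c :: rest) = List.drop (m + 5) rest := by
          rw [show m + 1 + 5 = (m + 5) + 1 by omega, List.drop_succ_cons]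
        rw [e1, e2]

theorem pv_splitF_ne_nil (l : List Char) : pvSplitF l ≠ [] := by
  by_cases h0 : 0 ≤ PySem.Chars.find l pvDn
  · rw [pv_splitF_pos l.length l le_rfl h0]
    simp
  · have h : PySem.Chars.find l pvDn = -1 := by
      have := PySem.Chars.neg_one_le_find l pvDn
      omega
    rw [pv_splitF_neg l.length l le_rfl h]
    simp

theorem pv_splitF_infix : ∀ (n : Nat) (l : List Char), l.length ≤ n →
    ∀ p ∈ pvSplitF l, p <:+: l := by
  intro n
  induction n with
  | zero =>
    intro l hl p hp
    have : l = [] := List.eq_nil_of_length_eq_zero (by omega)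
    subst this
    rw [pvSplitF, dif_neg (by decide)] at hp
    simp_all
  | succ n ih =>
    intro l hl p hp
    by_cases h0 : 0 ≤ PySem.Chars.find l pvDn
    · rw [pv_splitF_pos l.length l le_rfl h0] at hp
      obtain ⟨hpre, _⟩ := PySem.Chars.find_spec h0
      have hlen5 : (PySem.Chars.find l pvDn).toNat + 5 ≤ l.length := by
        have := hpre.length_le
        simp only [List.length_drop] at this
        have h5 : pvDn.length = 5 := by decide
        omega
      rcases List.mem_cons.mp hp with hp | hp
      · rw [hp]
        exact (List.take_prefix _ _).isInfix
      · have := ih (l.drop ((PySem.Chars.find l pvDn).toNat + 5))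
          (by simp only [List.length_drop]; omega) p hp
        exact this.trans (List.drop_suffix _ _).isInfix
    · have h : PySem.Chars.find l pvDn = -1 := by
        have := PySem.Chars.neg_one_le_find l pvDn
        omega
      rw [pv_splitF_neg l.length l le_rfl h] at hp
      simp at hp
      simp [hp]

theorem pv_prefix_getElem {a l : List Char} {p : Nat} (h : a <+: l.drop p)
    (k : Nat) (hk : k < a.length) : l[p + k]? = a[k]? := by
  obtain ⟨t, ht⟩ := h
  rw [← List.getElem?_drop, ← ht, List.getElem?_append_left hk]

theorem pv_no_overlap {l : List Char} {p j : Nat}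
    (hdn : pvDn <+: l.drop p) (hdd : pvDd <+: l.drop j) : j + 4 ≤ p ∨ p + 5 ≤ j := by
  by_contra hc
  rw [not_or] at hc
  obtain ⟨h1, h2⟩ := hc
  rcases (by omega : j = p ∨ j = p + 1 ∨ j = p + 2 ∨ j = p + 3 ∨ j = p + 4 ∨
      p = j + 1 ∨ p = j + 2 ∨ p = j + 3) with h | h | h | h | h | h | h | h
  · have a1 : l[p + 2]? = some 'n' := by rw [pv_prefix_getElem hdn 2 (by decide)]; decide
    have b1 : l[p + 2]? = some '(' := by
      rw [show p + 2 = j + 2 by omega, pv_prefix_getElem hdd 2 (by decide)]; decide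
    exact absurd (a1.symm.trans b1) (by decide)
  · have a1 : l[p + 1]? = some 'o' := by rw [pv_prefix_getElem hdn 1 (by decide)]; decide
    have b1 : l[p + 1]? = some 'd' := by
      rw [show p + 1 = j + 0 by omega, pv_prefix_getElem hdd 0 (by decide)]; decide
    exact absurd (a1.symm.trans b1) (by decide)
  · have a1 : l[p + 2]? = some 'n' := by rw [pv_prefix_getElem hdn 2 (by decide)]; decide
    have b1 : l[p + 2]? = some 'd' := by
      rw [show p + 2 = j + 0 by omega, pv_prefix_getElem hdd 0 (by decide)]; decide
    exact absurd (a1.symm.trans b1) (by decide)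
  · have a1 : l[p + 3]? = some '\'' := by rw [pv_prefix_getElem hdn 3 (by decide)]; decide
    have b1 : l[p + 3]? = some 'd' := by
      rw [show p + 3 = j + 0 by omega, pv_prefix_getElem hdd 0 (by decide)]; decide
    exact absurd (a1.symm.trans b1) (by decide)
  · have a1 : l[p + 4]? = some 't' := by rw [pv_prefix_getElem hdn 4 (by decide)]; decide
    have b1 : l[p + 4]? = some 'd' := by
      rw [show p + 4 = j + 0 by omega, pv_prefix_getElem hdd 0 (by decide)]; decide
    exact absurd (a1.symm.trans b1) (by decide)
  · have a1 : l[j + 1]? = some 'o' := by rw [pv_prefix_getElem hdd 1 (by decide)]; decide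
    have b1 : l[j + 1]? = some 'd' := by
      rw [show j + 1 = p + 0 by omega, pv_prefix_getElem hdn 0 (by decide)]; decide
    exact absurd (a1.symm.trans b1) (by decide)
  · have a1 : l[j + 2]? = some '(' := by rw [pv_prefix_getElem hdd 2 (by decide)]; decide
    have b1 : l[j + 2]? = some 'd' := by
      rw [show j + 2 = p + 0 by omega, pv_prefix_getElem hdn 0 (by decide)]; decide
    exact absurd (a1.symm.trans b1) (by decide)
  · have a1 : l[j + 3]? = some ')' := by rw [pv_prefix_getElem hdd 3 (by decide)]; decide
    have b1 : l[j + 3]? = some 'd' := by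
      rw [show j + 3 = p + 0 by omega, pv_prefix_getElem hdn 0 (by decide)]; decide
    exact absurd (a1.symm.trans b1) (by decide)

theorem pv_find_drop (l sub : List Char) (m : Nat)
    (h0 : 0 ≤ PySem.Chars.find l sub) (hm : m ≤ (PySem.Chars.find l sub).toNat) :
    PySem.Chars.find (l.drop m) sub = (((PySem.Chars.find l sub).toNat - m : Nat) : Int) := by
  obtain ⟨hpre, hmin⟩ := PySem.Chars.find_spec h0
  apply pv_find_eq
  · rw [List.drop_drop, show m + ((PySem.Chars.find l sub).toNat - m)
        = (PySem.Chars.find l sub).toNat by omega]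
    exact hpre
  · intro i hi hc
    rw [List.drop_drop] at hc
    exact hmin (m + i) (by omega) hc

theorem pv_find_take (l sub : List Char) (m : Nat)
    (h0 : 0 ≤ PySem.Chars.find l sub) (hb : (PySem.Chars.find l sub).toNat + sub.length ≤ m) :
    PySem.Chars.find (l.take m) sub = PySem.Chars.find l sub := by
  obtain ⟨hpre, hmin⟩ := PySem.Chars.find_spec h0
  have := pv_find_eq (l.take m) sub (PySem.Chars.find l sub).toNat ?_ ?_
  · rw [this]; omega
  · rw [List.drop_take, List.prefix_take_iff]
    exact ⟨hpre, by have := hpre.length_le; omega⟩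
  · intro i hi hc
    rw [List.drop_take] at hc
    exact hmin i hi (hc.trans (List.take_prefix _ _))

theorem pv_find_take_neg (l : List Char) (p : Nat)
    (h0 : 0 ≤ PySem.Chars.find l pvDd) (hb : p ≤ (PySem.Chars.find l pvDd).toNat) :
    PySem.Chars.find (l.take p) pvDd = -1 := by
  obtain ⟨hpre, hmin⟩ := PySem.Chars.find_spec h0
  rw [PySem.Chars.find_eq_neg_one_iff]
  intro hinf
  have hin : PySem.Chars.isIn pvDd (l.take p) = true := (PySem.Chars.isIn_iff_infix _ _).mpr hinf
  obtain ⟨i, hi⟩ := (PySem.Chars.exists_prefix_drop_iff_isIn pvDd (l.take p)).mpr hin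
  have hlen := hi.length_le
  have h4 : pvDd.length = 4 := by decide
  have hip : i + 4 ≤ p := by
    simp only [List.length_drop, List.length_take] at hlen
    omega
  have hdi : pvDd <+: l.drop i := by
    rw [List.drop_take] at hi
    exact hi.trans (List.take_prefix _ _)
  exact hmin i (by omega) hdi

def pvF (p : List Char) : List Char :=
  if 0 ≤ PySem.Chars.find p pvDd then p.drop ((PySem.Chars.find p pvDd).toNat + 4) else []

def pvSum (ps : List (List Char)) : List Char := ps.flatMap pvF

def pvProcF (l : List Char) : List Char :=
  match pvSplitF l with
  | [] => []
  | p :: ps => p ++ pvSum ps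

theorem pv_dd_len {l : List Char} {k : Nat} (h : pvDd <+: l.drop k) : k + 4 ≤ l.length := by
  have := h.length_le
  have h4 : pvDd.length = 4 := by decide
  simp only [List.length_drop] at this
  omega

theorem pv_dn_len {l : List Char} {k : Nat} (h : pvDn <+: l.drop k) : k + 5 ≤ l.length := by
  have := h.length_le
  have h5 : pvDn.length = 5 := by decide
  simp only [List.length_drop] at this
  omega

theorem pv_key : ∀ (n : Nat) (l : List Char), l.length ≤ n →
    0 ≤ PySem.Chars.find l pvDd →
    pvSum (pvSplitF l) = pvProcF (l.drop ((PySem.Chars.find l pvDd).toNat + 4)) := by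
  intro n
  induction n with
  | zero =>
    intro l hl h0
    have : l = [] := List.eq_nil_of_length_eq_zero (by omega)
    subst this
    have : PySem.Chars.find ([] : List Char) pvDd = -1 := by decide
    omega
  | succ n ih =>
    intro l hl h0
    obtain ⟨hpj, hmj⟩ := PySem.Chars.find_spec h0
    by_cases hp0 : 0 ≤ PySem.Chars.find l pvDn
    · obtain ⟨hpp, hmp⟩ := PySem.Chars.find_spec hp0
      rcases pv_no_overlap hpp hpj with hov | hov
      · -- do() strictly before the first don't: j + 4 ≤ p
        rw [pv_splitF_pos l.length l le_rfl hp0]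
        have hft : PySem.Chars.find (l.take (PySem.Chars.find l pvDn).toNat) pvDd
            = PySem.Chars.find l pvDd := by
          apply pv_find_take _ _ _ h0
          have h4 : pvDd.length = 4 := by decide
          omega
        have hfd : PySem.Chars.find (l.drop ((PySem.Chars.find l pvDd).toNat + 4)) pvDn
            = (((PySem.Chars.find l pvDn).toNat - ((PySem.Chars.find l pvDd).toNat + 4) : Nat) : Int) := by
          apply pv_find_drop _ _ _ hp0
          omega
        have h0d : 0 ≤ PySem.Chars.find (l.drop ((PySem.Chars.find l pvDd).toNat + 4)) pvDn := by
          rw [hfd]; omega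
        rw [pvProcF, pv_splitF_pos (l.drop ((PySem.Chars.find l pvDd).toNat + 4)).length _ le_rfl h0d]
        rw [pvSum, List.flatMap_cons, ← pvSum]
        congr 1
        · -- pvF (take p) = (drop (j+4) l).take (p - (j+4))
          rw [pvF, hft, if_pos h0]
          rw [List.drop_take]
          rw [hfd]
          simp only [Int.toNat_natCast]
        · -- remaining splits agree
          rw [hfd]
          simp only [Int.toNat_natCast, List.drop_drop]
          have hidx : ((PySem.Chars.find l pvDd).toNat + 4)
              + (((PySem.Chars.find l pvDn).toNat - ((PySem.Chars.find l pvDd).toNat + 4)) + 5)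
              = (PySem.Chars.find l pvDn).toNat + 5 := by omega
          rw [hidx]
      · -- first don't strictly before do(): p + 5 ≤ j
        rw [pv_splitF_pos l.length l le_rfl hp0]
        rw [pvSum, List.flatMap_cons, ← pvSum]
        have hfn : PySem.Chars.find (l.take (PySem.Chars.find l pvDn).toNat) pvDd = -1 :=
          pv_find_take_neg _ _ h0 (by omega)
        have hz : pvF (l.take (PySem.Chars.find l pvDn).toNat) = [] := by
          rw [pvF, hfn]
          norm_num
        rw [hz, List.nil_append]
        have hfd : PySem.Chars.find (l.drop ((PySem.Chars.find l pvDn).toNat + 5)) pvDd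
            = (((PySem.Chars.find l pvDd).toNat - ((PySem.Chars.find l pvDn).toNat + 5) : Nat) : Int) := by
          apply pv_find_drop _ _ _ h0
          omega
        have h0d : 0 ≤ PySem.Chars.find (l.drop ((PySem.Chars.find l pvDn).toNat + 5)) pvDd := by
          rw [hfd]; omega
        have hlen : (l.drop ((PySem.Chars.find l pvDn).toNat + 5)).length ≤ n := by
          have := pv_dn_len hpp
          simp only [List.length_drop]
          omega
        rw [ih _ hlen h0d]
        rw [hfd]
        simp only [Int.toNat_natCast, List.drop_drop]
        congr 2
        omega
    · have hpn : PySem.Chars.find l pvDn = -1 := by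
        have := PySem.Chars.neg_one_le_find l pvDn
        omega
      rw [pv_splitF_neg l.length l le_rfl hpn]
      have hnd : PySem.Chars.find (l.drop ((PySem.Chars.find l pvDd).toNat + 4)) pvDn = -1 := by
        rw [PySem.Chars.find_eq_neg_one_iff]
        intro hc
        exact (PySem.Chars.find_eq_neg_one_iff l pvDn).mp hpn
          (hc.trans (List.drop_suffix _ _).isInfix)
      rw [pvProcF, pv_splitF_neg (l.drop ((PySem.Chars.find l pvDd).toNat + 4)).length _ le_rfl hnd]
      simp only [pvSum, List.flatMap_cons, List.flatMap_nil, List.append_nil]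
      rw [pvF, if_pos h0]
theorem pvDnEq : "don't".toList = pvDn := rfl
theorem pvDdEq : "do()".toList = pvDd := rfl

theorem pv_scan_spec : ∀ (n : Nat) (l : List Char), l.length ≤ n →
    (∀ acc, (pvScan true l acc).flatten = acc.flatten ++ pvProcF l) ∧
    (∀ acc, (pvScan false l acc).flatten = acc.flatten ++ pvSum (pvSplitF l)) := by
  intro n
  induction n with
  | zero =>
    intro l hl
    have : l = [] := List.eq_nil_of_length_eq_zero (by omega)
    subst this
    constructor
    · intro acc
      rw [pvScan]
      simp only [pvDnEq, if_true]
      rw [dif_pos (by decide)]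
      have : pvProcF [] = [] := by
        rw [pvProcF, pv_splitF_neg 0 [] le_rfl (by decide)]
        simp [pvSum]
      rw [this]
      simp
    · intro acc
      rw [pvScan]
      simp only [pvDdEq]
      rw [if_neg (by decide), dif_pos (by decide)]
      have : pvSum (pvSplitF []) = [] := by
        rw [pv_splitF_neg 0 [] le_rfl (by decide), pvSum]
        simp [pvF]
      rw [this]
      simp
  | succ n ih =>
    intro l hl
    constructor
    · intro acc
      rw [pvScan]
      simp only [pvDnEq, if_true]
      by_cases h : PySem.Chars.find l pvDn = -1
      · rw [dif_pos h]
        rw [pvProcF, pv_splitF_neg l.length l le_rfl h]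
        simp [pvSum]
      · rw [dif_neg h]
        have h0 : 0 ≤ PySem.Chars.find l pvDn := by
          have := PySem.Chars.neg_one_le_find l pvDn
          omega
        have hpp := (PySem.Chars.find_spec h0).1
        have hlen : (l.drop ((PySem.Chars.find l pvDn).toNat + 5)).length ≤ n := by
          have := pv_dn_len hpp
          simp only [List.length_drop]
          omega
        rw [(ih _ hlen).2]
        rw [pvProcF, pv_splitF_pos l.length l le_rfl h0]
        simp [pvSum]
    · intro acc
      rw [pvScan]
      simp only [pvDdEq]
      rw [if_neg (by simp)]
      by_cases h : PySem.Chars.find l pvDd = -1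
      · rw [dif_pos h]
        have hz : pvSum (pvSplitF l) = [] := by
          rw [pvSum, List.flatMap_eq_nil_iff]
          intro p hp
          have hinf := pv_splitF_infix l.length l le_rfl p hp
          have : PySem.Chars.find p pvDd = -1 := by
            rw [PySem.Chars.find_eq_neg_one_iff]
            intro hc
            exact (PySem.Chars.find_eq_neg_one_iff l pvDd).mp h (hc.trans hinf)
          rw [pvF, this]
          norm_num
        rw [hz]
        simp
      · rw [dif_neg h]
        have h0 : 0 ≤ PySem.Chars.find l pvDd := by
          have := PySem.Chars.neg_one_le_find l pvDd
          omega
        have hpj := (PySem.Chars.find_spec h0).1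
        have hlen : (l.drop ((PySem.Chars.find l pvDd).toNat + 4)).length ≤ n := by
          have := pv_dd_len hpj
          simp only [List.length_drop]
          omega
        rw [(ih _ hlen).1]
        rw [pv_key l.length l le_rfl h0]

def pvG (acc piece : List Char) : List Char :=
  if PySem.Chars.isIn pvDd piece then
    acc ++ PySem.List.slice piece (some (PySem.Chars.find piece pvDd + 4)) none
  else acc

theorem pv_G_eq : pvG = fun acc x => acc ++ pvF x := by
  funext acc x
  rw [pvG, pvF]
  by_cases hin : PySem.Chars.isIn pvDd x = true
  · rw [if_pos hin]
    have h0 : 0 ≤ PySem.Chars.find x pvDd :=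
      (PySem.Chars.find_nonneg_iff x pvDd).mpr ((PySem.Chars.isIn_iff_infix pvDd x).mp hin)
    rw [if_pos h0]
    congr 1
    rw [PySem.List.slice_from x (by omega)]
    congr 1
    omega
  · rw [if_neg hin]
    have hni : ¬ 0 ≤ PySem.Chars.find x pvDd := by
      intro hc
      exact hin ((PySem.Chars.isIn_iff_infix pvDd x).mpr
        ((PySem.Chars.find_nonneg_iff x pvDd).mp hc))
    rw [if_neg hni]
    simp

theorem pv_procA_eq (l : List Char) : pvProcA l = pvProcF l := by
  unfold pvProcA
  simp only [pvDnEq, pvDdEq, pv_splitOn_eq, List.nil_append]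
  obtain ⟨p, ps, hs⟩ : ∃ p ps, pvSplitF l = p :: ps := by
    cases h : pvSplitF l with
    | nil => exact absurd h (pv_splitF_ne_nil l)
    | cons a b => exact ⟨a, b, rfl⟩
  rw [hs]
  have h0 : PySem.List.pyGetD (p :: ps) 0 [] = p := by
    simp [PySem.List.pyGetD, PySem.List.pyGet?, PySem.List.pyIdx?]
  rw [h0]
  have hfun : (fun (acc : List Char) (i : Int) =>
      let piece := PySem.List.pyGetD (p :: ps) i []
      if PySem.Chars.isIn pvDd piece then
        acc ++ PySem.List.slice piece (some (PySem.Chars.find piece pvDd + 4)) none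
      else acc)
      = (fun acc i => pvG acc (PySem.List.pyGetD (p :: ps) i [])) := rfl
  rw [hfun, PySem.List.foldl_pyRange_pyGetD (p :: ps) [] pvG p (by norm_num)]
  rw [pv_G_eq, PySem.List.foldl_append_eq_flatMap]
  rw [pvProcF, hs]
  simp [pvSum]

-- ===== VERDICT (by name: the statement is the Claim_ definition above) =====
theorem handle_dos_and_donts_3_spec : Claim_equal_handle_dos_and_donts_3 := by
  intro s _
  unfold Spec_handle_dos_and_donts_3 handle_dos_and_donts_3 handle_dos_and_donts_3_alt
  congr 1
  rw [pv_procA_eq]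
  rw [(pv_scan_spec s.toList.length s.toList le_rfl).1 []]
  simp
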